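-- pv_equiv track=rewrite | github.com/BharatSahAIyak/upcar-advisory | src/ocr.py | merge_lines_between_empty_lines
-- ===== SOURCE A (Python) =====
-- def merge_lines_between_empty_lines(text):
--     lines = text.split('\n')
--     merged_lines = []
--     current_block = []
--     for line in lines:
--         if not line.strip():
--             if current_block:
--                 merged_lines.append(' '.join(current_block))
--                 current_block = []
--             merged_lines.append('')
--         else:
--             current_block.append(line.strip())
--     if current_block:
--         merged_lines.append(' '.join(current_block))
--     fixed_text = '\n'.join(merged_lines)
--     return fixed_text
-- ===== SOURCE B (Python) =====
-- from itertools import groupby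
--
--
-- def merge_lines_between_empty_lines(text):
--     out = []
--     for has_content, group in groupby(text.split('\n'), key=lambda l: bool(l.strip())):
--         if has_content:
--             out.append(' '.join(l.strip() for l in group))
--         else:
--             out.extend('' for _ in group)
--     return '\n'.join(out)
-- ===== Notes on version B (the rewrite author's own statement) =====
-- stated objective: alternative
-- what changed: Replaces A's running current_block accumulator and its flush-on-blank logic by an itertools.groupby traversal that first partitions the lines into maximal blank/non-blank runs and then emits one joined line per content run and one empty output line per blank line.
import Mathlib
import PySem

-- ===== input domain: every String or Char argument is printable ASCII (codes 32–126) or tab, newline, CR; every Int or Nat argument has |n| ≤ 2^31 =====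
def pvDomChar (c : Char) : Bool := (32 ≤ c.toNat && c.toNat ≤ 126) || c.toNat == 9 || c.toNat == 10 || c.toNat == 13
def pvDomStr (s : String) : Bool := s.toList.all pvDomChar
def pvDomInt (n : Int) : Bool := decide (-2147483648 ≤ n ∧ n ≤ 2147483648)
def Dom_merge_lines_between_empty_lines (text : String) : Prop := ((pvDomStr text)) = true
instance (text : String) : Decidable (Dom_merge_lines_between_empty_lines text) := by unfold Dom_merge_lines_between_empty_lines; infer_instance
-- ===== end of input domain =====

-- B replaces A's running current_block accumulator and flush-on-blank logic by a groupby-style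
-- traversal (partition into maximal blank/non-blank runs, then emit per run); alternative, same cost.

-- ===== PORT A =====
-- A's for-loop: state (merged_lines, current_block), branches in source order.
def mlbelStepA (st : List String × List String) (line : String) : List String × List String :=
  if PySem.Str.strip line == "" then
    ((if st.2.isEmpty then st.1 else st.1 ++ [PySem.Str.join " " st.2]) ++ [""], [])
  else
    (st.1, st.2 ++ [PySem.Str.strip line])

def merge_lines_between_empty_lines (text : String) : String :=
  let lines := (PySem.Str.split? text "\n").getD []
  let st := lines.foldl mlbelStepA ([], [])
  let merged := if st.2.isEmpty then st.1 else st.1 ++ [PySem.Str.join " " st.2]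
  PySem.Str.join "\n" merged

-- ===== PORT B =====
-- itertools.groupby(lines, key): maximal runs of equal key, in order (key = line has content).
def mlbelKey (line : String) : Bool := !(PySem.Str.strip line == "")

def mlbelGroups (k : Bool) (acc : List String) : List String → List (Bool × List String)
  | [] => [(k, acc)]
  | l :: ls =>
    if mlbelKey l == k then mlbelGroups k (acc ++ [l]) ls
    else (k, acc) :: mlbelGroups (mlbelKey l) [l] ls

-- the for-loop over the groups: append the joined block, or extend with one '' per blank line
def mlbelEmit (out : List String) (g : Bool × List String) : List String :=
  if g.1 then out ++ [PySem.Str.join " " (g.2.map PySem.Str.strip)]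
  else out ++ g.2.map (fun _ => "")

def merge_lines_between_empty_lines_alt (text : String) : String :=
  let lines := (PySem.Str.split? text "\n").getD []
  let grps := match lines with
    | [] => []
    | l :: ls => mlbelGroups (mlbelKey l) [l] ls
  PySem.Str.join "\n" (grps.foldl mlbelEmit [])

-- ===== PRECONDITION & SPEC =====
def Spec_merge_lines_between_empty_lines (text : String) (out : String) : Prop := out = merge_lines_between_empty_lines_alt text
instance (text : String) (out : String) : Decidable (Spec_merge_lines_between_empty_lines text out) := by unfold Spec_merge_lines_between_empty_lines; infer_instance

-- ===== CLAIM (what is proved, stated in full; the proofs are below) =====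
def Claim_equal_merge_lines_between_empty_lines : Prop := ∀ (text : String), Dom_merge_lines_between_empty_lines text → Spec_merge_lines_between_empty_lines text (merge_lines_between_empty_lines text)

-- ===== LEMMAS AND PROOFS =====
-- canonical form of A's result on a suffix of the lines, given the current (stripped) block c
def mlbelF : List String → List String → List String
  | [], c => if c.isEmpty then [] else [PySem.Str.join " " c]
  | l :: ls, c =>
    if PySem.Str.strip l == "" then
      (if c.isEmpty then [] else [PySem.Str.join " " c]) ++ [""] ++ mlbelF ls []
    else mlbelF ls (c ++ [PySem.Str.strip l])

theorem mlbelA_eq_F (ls : List String) : ∀ (m c : List String),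
    (let st := ls.foldl mlbelStepA (m, c)
     if st.2.isEmpty then st.1 else st.1 ++ [PySem.Str.join " " st.2]) = m ++ mlbelF ls c := by
  induction ls with
  | nil => intro m c; simp only [List.foldl_nil, mlbelF]; split <;> simp
  | cons l ls ih =>
    intro m c
    simp only [List.foldl_cons, mlbelStepA, mlbelF]
    by_cases h : PySem.Str.strip l == ""
    · simp only [h, ih]
      by_cases hc : c.isEmpty
      all_goals try simp [hc]
    · simp only [if_neg h, ih]

theorem mlbelEmit_split (out : List String) (g : Bool × List String) :
    mlbelEmit out g = out ++ mlbelEmit [] g := by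
  by_cases h : g.1 <;> simp [mlbelEmit, h]

theorem mlbelGroups_emit (ls : List String) : ∀ (k : Bool) (acc : List String), acc ≠ [] →
    (mlbelGroups k acc ls).flatMap (mlbelEmit []) =
      (if k then mlbelF ls (acc.map PySem.Str.strip)
       else acc.map (fun _ => "") ++ mlbelF ls []) := by
  induction ls with
  | nil =>
    intro k acc hacc
    cases k <;>
      simp [mlbelGroups, mlbelEmit, mlbelF, hacc]
  | cons l ls ih =>
    intro k acc hacc
    simp only [mlbelGroups]
    by_cases hl : (mlbelKey l == k) = true
    · rw [if_pos hl, ih k (acc ++ [l]) (by simp)]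
      have hk : mlbelKey l = k := by simpa using hl
      cases k
      · have hblank : (PySem.Str.strip l == "") = true := by simpa [mlbelKey] using hk
        simp [mlbelF, hblank]
      · have hcont : (PySem.Str.strip l == "") = false := by simpa [mlbelKey] using hk
        simp [mlbelF, hcont]
    · rw [if_neg hl]
      have hrest := ih (mlbelKey l) [l] (by simp)
      simp only [List.flatMap_cons, hrest]
      cases hkc : mlbelKey l with
      | true =>
        have hkf : k = false := by
          cases k
          · rfl
          · exact absurd (by simp [hkc]) hl
        have hcont : (PySem.Str.strip l == "") = false := by simpa [mlbelKey] using hkc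
        subst hkf
        simp [mlbelEmit, mlbelF, hcont]
      | false =>
        have hkt : k = true := by
          cases k
          · exact absurd (by simp [hkc]) hl
          · rfl
        have hblank : (PySem.Str.strip l == "") = true := by simpa [mlbelKey] using hkc
        subst hkt
        simp [mlbelEmit, mlbelF, hblank, hacc]

theorem mlbelB_eq_F (ls : List String) :
    (match ls with
      | [] => ([] : List (Bool × List String))
      | l :: ls => mlbelGroups (mlbelKey l) [l] ls).foldl mlbelEmit [] = mlbelF ls [] := by
  have hfun : mlbelEmit = fun out g => out ++ mlbelEmit [] g := by
    funext out g; exact mlbelEmit_split out g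
  cases ls with
  | nil => simp [mlbelF]
  | cons l ls =>
    rw [hfun, PySem.List.foldl_append_eq_flatMap]
    rw [mlbelGroups_emit ls (mlbelKey l) [l] (by simp)]
    by_cases h : (PySem.Str.strip l == "") = true
    · have hk : mlbelKey l = false := by simp [mlbelKey, h]
      have h' : PySem.Str.strip l = "" := by simpa using h
      simp [hk, mlbelF, h']
    · have hk : mlbelKey l = true := by simp [mlbelKey, h]
      simp [hk, mlbelF, h]

-- ===== VERDICT (by name: the statement is the Claim_ definition above) =====
theorem merge_lines_between_empty_lines_spec : Claim_equal_merge_lines_between_empty_lines := by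
  intro text _
  unfold Spec_merge_lines_between_empty_lines merge_lines_between_empty_lines
    merge_lines_between_empty_lines_alt
  simp only []
  rw [mlbelB_eq_F]
  have := mlbelA_eq_F ((PySem.Str.split? text "\n").getD []) [] []
  simp only [List.nil_append] at this
  rw [this]
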